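-- pv_equiv track=rewrite | github.com/Drayhar/LEPL1401-INFO-1 | scratch.py | create_dict_max
-- ===== SOURCE A (Python) =====
-- def create_dict_max(l):
--     dict = {}
--     for i in range(len(l)):
--         dict[l[i][0]] = []
--     for j in range(len(l)):
--         dict[l[j][0]].append(l[j][1])
--     for k in dict:
--         dict[k] = max(dict[k])
--     return dict
-- ===== SOURCE B (Python) =====
-- def create_dict_max(l):
--     res = {}
--     for k, v in l:
--         cur = res.get(k)
--         res[k] = v if cur is None else max(cur, v)
--     return res
-- ===== Notes on version B (the rewrite author's own statement) =====
-- stated objective: simpler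
-- what changed: Replaces three passes (collect keys, build per-key value lists, reduce each list with max) by one pass that keeps a scalar running maximum per key in the dict.
import Mathlib
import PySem

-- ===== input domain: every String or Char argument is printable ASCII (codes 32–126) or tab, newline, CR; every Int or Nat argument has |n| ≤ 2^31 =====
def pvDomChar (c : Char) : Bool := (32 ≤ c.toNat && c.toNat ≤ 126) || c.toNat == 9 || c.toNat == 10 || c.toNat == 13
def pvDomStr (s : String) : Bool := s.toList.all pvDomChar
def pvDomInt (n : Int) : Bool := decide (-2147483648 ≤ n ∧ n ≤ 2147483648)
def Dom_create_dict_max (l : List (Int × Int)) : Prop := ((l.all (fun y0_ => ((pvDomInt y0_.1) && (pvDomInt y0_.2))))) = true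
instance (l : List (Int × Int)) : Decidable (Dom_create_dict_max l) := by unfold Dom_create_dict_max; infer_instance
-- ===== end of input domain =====

-- B replaces A's three passes (key collection, per-key value lists, max-reduction) by one
-- pass keeping a scalar running maximum per key; same result, simpler and less memory.


-- ===== PORT A =====
-- 'for i in range(len(l)): … l[i] …' is folded over l itself (i always in range).
-- 'for k in dict: dict[k] = max(dict[k])' rewrites each value in place, i.e. maps over the
-- items; Python's max raises on [] but every list here is nonempty, so the .getD 0 default
-- of PySem.List.max? is unreachable.
def create_dict_max (l : List (Int × Int)) : List (Int × Int) :=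
  -- loop 3 maps over (loop 2 applied to loop 1's dict):
  ((l.foldl (fun d p => d.modify p.1 [] (fun xs => xs ++ [p.2]))        -- dict[l[j][0]].append(l[j][1])
      (l.foldl (fun d p => d.insert p.1 ([] : List Int))                -- dict[l[i][0]] = []
        PySem.Dict.empty)).items).map
    (fun kv => (kv.1, (PySem.List.max? kv.2 (fun y => y)).getD 0))      -- dict[k] = max(dict[k])

-- ===== PORT B =====
-- one pass: res.get(k) is None → store v, else store max(cur, v)
def create_dict_max_alt (l : List (Int × Int)) : List (Int × Int) :=
  (l.foldl (fun d p =>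
      d.insert p.1 (match PySem.Dict.get? d p.1 with
        | none => p.2
        | some cur => max cur p.2)) (PySem.Dict.empty : PySem.Dict Int Int)).items

-- ===== PRECONDITION & SPEC =====
def Spec_create_dict_max (l : List (Int × Int)) (out : List (Int × Int)) : Prop := out = create_dict_max_alt l
instance (l : List (Int × Int)) (out : List (Int × Int)) : Decidable (Spec_create_dict_max l out) := by unfold Spec_create_dict_max; infer_instance

-- ===== CLAIM (what is proved, stated in full; the proofs are below) =====
def Claim_equal_create_dict_max : Prop := ∀ (l : List (Int × Int)), Dom_create_dict_max l → Spec_create_dict_max l (create_dict_max l)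

-- ===== LEMMAS AND PROOFS =====

-- A's first loop: every value stored is [], so getD with default [] is always []
theorem pvA_d0_getD (l : List (Int × Int)) (d : PySem.Dict Int (List Int))
    (h : ∀ k, d.getD k [] = []) (k : Int) :
    (l.foldl (fun d p => d.insert p.1 []) d).getD k [] = [] := by
  induction l generalizing d with
  | nil => exact h k
  | cons a t ih =>
      simp only [List.foldl_cons]
      exact ih _ (fun k' => by rw [PySem.Dict.getD_insert]; split_ifs <;> simp [h])

-- the running-max combining step of B, on an optional accumulator
def pvRunMax (o : Option Int) (v : Int) : Option Int :=
  some (match o with | none => v | some m => max m v)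

theorem pvRunMax_foldl_some (t : List Int) (a : Int) :
    t.foldl pvRunMax (some a) = some (t.foldl max a) := by
  induction t generalizing a with
  | nil => rfl
  | cons x xs ih => simpa [pvRunMax] using ih (max a x)

-- B's fold, looked up at a key, is the running max over the values at that key
theorem pvB_get? (l : List (Int × Int)) (d : PySem.Dict Int Int) (k : Int) :
    PySem.Dict.get? (l.foldl (fun d p =>
        d.insert p.1 (match PySem.Dict.get? d p.1 with
          | none => p.2
          | some cur => max cur p.2)) d) k
      = ((l.filter (fun p => p.1 == k)).map (·.2)).foldl pvRunMax (PySem.Dict.get? d k) := by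
  induction l generalizing d with
  | nil => rfl
  | cons a t ih =>
      simp only [List.foldl_cons, List.filter_cons]
      by_cases hk : a.1 = k
      · subst hk
        simp only [beq_self_eq_true, if_pos, List.map_cons, List.foldl_cons]
        rw [ih, PySem.Dict.get?_insert_self]
        cases h : PySem.Dict.get? d a.1 <;> simp [pvRunMax]
      · have hb : (a.1 == k) = false := by simpa using hk
        simp only [hb, Bool.false_eq_true, if_false]
        rw [ih, PySem.Dict.get?_insert_of_ne _ _ (Ne.symm hk)]

theorem pvUpdate_ofList_self (xs : List Int) :
    PySem.Set.update (PySem.Set.ofList xs) xs = PySem.Set.ofList xs := by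
  rw [PySem.Set.update_eq_append_filter]
  have : (PySem.Set.ofList xs).filter
      (fun y => !(PySem.Set.contains (PySem.Set.ofList xs) y)) = [] := by
    apply List.filter_eq_nil_iff.mpr
    intro y hy
    have hyx : y ∈ xs := (PySem.Set.mem_ofList _ _).mp hy
    simp [hyx]
  rw [this, List.append_nil]

theorem create_dict_max_eq_alt (l : List (Int × Int)) :
    create_dict_max l = create_dict_max_alt l := by
  unfold create_dict_max create_dict_max_alt
  set xs := l.map Prod.fst with hxs
  -- A side: keys of d0 and d1
  have hk0 : (l.foldl (fun d p => d.insert p.1 ([] : List Int)) PySem.Dict.empty).keys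
      = PySem.Set.ofList xs := by
    rw [PySem.Dict.keys_foldl_insert_key, PySem.Dict.keys_empty,
        PySem.Set.update_nil_left, hxs]
  have hnd0 : (l.foldl (fun d p => d.insert p.1 ([] : List Int)) PySem.Dict.empty).keys.Nodup := by
    rw [hk0]; exact PySem.Set.nodup_ofList xs
  have hk1 : (l.foldl (fun d p => d.modify p.1 [] (fun ys => ys ++ [p.2]))
        (l.foldl (fun d p => d.insert p.1 ([] : List Int)) PySem.Dict.empty)).keys
      = PySem.Set.ofList xs := by
    rw [PySem.Dict.keys_foldl_modify_key, hk0, ← hxs, pvUpdate_ofList_self]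
  have hnd1 : (l.foldl (fun d p => d.modify p.1 [] (fun ys => ys ++ [p.2]))
        (l.foldl (fun d p => d.insert p.1 ([] : List Int)) PySem.Dict.empty)).keys.Nodup := by
    rw [hk1]; exact PySem.Set.nodup_ofList xs
  -- B side: keys
  have hkB : (l.foldl (fun d p =>
        d.insert p.1 (match PySem.Dict.get? d p.1 with
          | none => p.2
          | some cur => max cur p.2)) (PySem.Dict.empty : PySem.Dict Int Int)).keys
      = PySem.Set.ofList xs := by
    rw [PySem.Dict.keys_foldl_insert_key, PySem.Dict.keys_empty,
        PySem.Set.update_nil_left, hxs]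
  have hndB : (l.foldl (fun d p =>
        d.insert p.1 (match PySem.Dict.get? d p.1 with
          | none => p.2
          | some cur => max cur p.2)) (PySem.Dict.empty : PySem.Dict Int Int)).keys.Nodup := by
    rw [hkB]; exact PySem.Set.nodup_ofList xs
  rw [PySem.Dict.items_eq_map_keys _ hnd1 [], PySem.Dict.items_eq_map_keys _ hndB 0,
      hk1, hkB, List.map_map]
  apply List.map_congr_left
  intro k _
  simp only [Function.comp]
  congr 1
  -- value at key k on each side
  have hA : (l.foldl (fun d p => d.modify p.1 [] (fun ys => ys ++ [p.2]))
        (l.foldl (fun d p => d.insert p.1 ([] : List Int)) PySem.Dict.empty)).getD k []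
      = (l.filter (fun p => p.1 == k)).map (·.2) := by
    rw [PySem.Dict.getD_foldl_modify_append,
        pvA_d0_getD l PySem.Dict.empty (fun k' => by simp) k, List.nil_append]
  have hB : (l.foldl (fun d p =>
        d.insert p.1 (match PySem.Dict.get? d p.1 with
          | none => p.2
          | some cur => max cur p.2)) (PySem.Dict.empty : PySem.Dict Int Int)).getD k 0
      = (((l.filter (fun p => p.1 == k)).map (·.2)).foldl pvRunMax none).getD 0 := by
    rw [PySem.Dict.getD_eq_get?_getD, pvB_get?]
    simp
  rw [hA, hB]
  cases hvs : (l.filter (fun p => p.1 == k)).map (·.2) with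
  | nil => rfl
  | cons x t =>
      rw [PySem.List.max?_id_cons]
      have : pvRunMax none x = some x := rfl
      simp only [List.foldl_cons, this, pvRunMax_foldl_some]

-- ===== VERDICT (by name: the statement is the Claim_ definition above) =====
theorem create_dict_max_spec : Claim_equal_create_dict_max := by
  intro l _
  unfold Spec_create_dict_max
  exact create_dict_max_eq_alt l
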